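-- pv_equiv track=rewrite | github.com/curt-tigges/exploring-summarization | prompt_patching_experiments.py | flip_list
-- ===== SOURCE A (Python) =====
-- def flip_list(lst, n):
--     # Ensure n is valid
--     if n <= 0 or n > len(lst):
--         return "Invalid value of n"
--
--     flipped_list = []
--     # Process the list in chunks of 2n
--     for i in range(0, len(lst), 2 * n):
--         chunk = lst[i:i + 2 * n]
--         # If the chunk is less than 2n but at least n, flip what we can
--         if n <= len(chunk) < 2 * n:
--             flipped_list.extend(chunk[n:] + chunk[:n])
--         # If the chunk is exactly 2n, flip the two n-length sub-chunks
--         elif len(chunk) == 2 * n: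
--             flipped_list.extend(chunk[n:] + chunk[:n])
--         # If the chunk is less than n, just add the remaining elements
--         else:
--             flipped_list.extend(chunk)
--
--     return flipped_list
-- ===== SOURCE B (Python) =====
-- def flip_list(lst, n):
--     # Same validity guard as the original
--     if n <= 0 or n > len(lst):
--         return "Invalid value of n"
--
--     # Split into fixed n-sized pieces, then walk them two at a time,
--     # emitting each complete pair swapped; a lone trailing piece is kept.
--     pieces = [lst[i:i + n] for i in range(0, len(lst), n)]
--     out = []
--     k = 0
--     while k + 1 < len(pieces):
--         out.extend(pieces[k + 1])
--         out.extend(pieces[k])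
--         k += 2
--     if k < len(pieces):
--         out.extend(pieces[k])
--     return out
-- ===== Notes on version B (the rewrite author's own statement) =====
-- stated objective: alternative
-- what changed: A slices 2n-wide chunks off the list and swaps each chunk's halves with a three-way length case split; B splits the list once into n-sized pieces and walks the piece list two at a time, emitting each pair swapped and a lone trailing piece unchanged.
-- outside the precondition, e.g. on flip_list([1, 2, 3], 0): A returns 'Invalid value of n', B returns 'Invalid value of n'
import Mathlib
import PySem

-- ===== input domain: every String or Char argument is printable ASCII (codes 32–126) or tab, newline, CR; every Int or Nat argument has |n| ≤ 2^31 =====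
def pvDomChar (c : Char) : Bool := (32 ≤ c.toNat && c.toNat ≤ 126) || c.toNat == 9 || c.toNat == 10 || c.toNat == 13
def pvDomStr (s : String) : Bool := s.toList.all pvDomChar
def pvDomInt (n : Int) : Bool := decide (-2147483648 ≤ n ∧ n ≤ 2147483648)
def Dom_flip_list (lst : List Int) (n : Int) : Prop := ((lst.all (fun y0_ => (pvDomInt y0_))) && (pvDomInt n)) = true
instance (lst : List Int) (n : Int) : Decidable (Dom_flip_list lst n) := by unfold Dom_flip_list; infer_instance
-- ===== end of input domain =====

-- B restructures A's 2n-chunk half-swap as: split once into n-sized pieces, then walk the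
-- pieces two at a time emitting each pair swapped (alternative decomposition, same cost).
-- On n <= 0 or n > len(lst) both Pythons return the string "Invalid value of n" (not a
-- list); those inputs are outside Pre_ and the ports return [] there.

-- ===== PORT A =====
def flip_list (lst : List Int) (n : Int) : List Int :=
  if n ≤ 0 ∨ n > (lst.length : Int) then []   -- Python returns the string "Invalid value of n"; excluded by Pre_
  else
    (PySem.List.pyRange 0 (lst.length : Int) (2 * n)).foldl
      (fun acc i =>
        let chunk := PySem.List.slice lst (some i) (some (i + 2 * n))
        if n ≤ (chunk.length : Int) ∧ (chunk.length : Int) < 2 * n then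
          acc ++ (PySem.List.slice chunk (some n) none ++ PySem.List.slice chunk none (some n))
        else if (chunk.length : Int) = 2 * n then
          acc ++ (PySem.List.slice chunk (some n) none ++ PySem.List.slice chunk none (some n))
        else
          acc ++ chunk) []

-- ===== PORT B =====
-- walk the pieces two at a time: each complete pair is emitted swapped, a lone last piece kept
def pvWalkPairs (pieces : List (List Int)) : List Int :=
  match pieces with
  | [] => []
  | [p] => p
  | p :: q :: rest => q ++ p ++ pvWalkPairs rest

def flip_list_alt (lst : List Int) (n : Int) : List Int :=
  if n ≤ 0 ∨ n > (lst.length : Int) then []   -- Python returns the string "Invalid value of n"; excluded by Pre_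
  else
    pvWalkPairs ((PySem.List.pyRange 0 (lst.length : Int) n).map
      (fun i => PySem.List.slice lst (some i) (some (i + n))))

-- ===== PRECONDITION & SPEC =====
-- Pre_ excludes n ≤ 0 and n > len(lst), where both Pythons return the string
-- "Invalid value of n" instead of a list of ints (no value of the declared type).
def Pre_flip_list (lst : List Int) (n : Int) : Prop := 0 < n ∧ n ≤ (lst.length : Int)
instance (lst : List Int) (n : Int) : Decidable (Pre_flip_list lst n) := by unfold Pre_flip_list; infer_instance
def pvWitness_flip_list : List Int × Int := ([1, 2, 3, 4, 5], 2)
def Spec_flip_list (lst : List Int) (n : Int) (out : List Int) : Prop := out = flip_list_alt lst n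
instance (lst : List Int) (n : Int) (out : List Int) : Decidable (Spec_flip_list lst n out) := by unfold Spec_flip_list; infer_instance

-- ===== CLAIM (what is proved, stated in full; the proofs are below) =====
def Claim_equal_flip_list : Prop := ∀ (lst : List Int) (n : Int), Dom_flip_list lst n → Pre_flip_list lst n → Spec_flip_list lst n (flip_list lst n)

-- ===== LEMMAS AND PROOFS =====

-- pyRange with a positive step: nil and cons forms
theorem pvRange_pos_nil (a b s : Int) (hs : 0 < s) (hab : b ≤ a) :
    PySem.List.pyRange a b s = [] := by
  rw [PySem.List.pyRange_of_pos a b hs]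
  simp [if_neg (by omega : ¬ a < b)]

theorem pvRange_pos_cons (a b s : Int) (hs : 0 < s) (hab : a < b) :
    PySem.List.pyRange a b s = a :: PySem.List.pyRange (a + s) b s := by
  rw [PySem.List.pyRange_of_pos a b hs, PySem.List.pyRange_of_pos (a + s) b hs]
  have hd : (b - a + s - 1) / s = (b - a - 1) / s + 1 := by
    have : b - a + s - 1 = (b - a - 1) + 1 * s := by ring
    rw [this, Int.add_mul_ediv_right _ _ (by omega : s ≠ 0)]
  have hq0 : 0 ≤ (b - a - 1) / s := Int.ediv_nonneg (by omega) (by omega)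
  have hcount : (if a < b then ((b - a + s - 1) / s).toNat else 0)
      = (if a + s < b then ((b - (a + s) + s - 1) / s).toNat else 0) + 1 := by
    rw [if_pos hab, hd]
    by_cases h2 : a + s < b
    · rw [if_pos h2]
      have : b - (a + s) + s - 1 = b - a - 1 := by ring
      rw [this]
      omega
    · rw [if_neg h2]
      have : (b - a - 1) / s = 0 :=
        Int.ediv_eq_zero_of_lt (by omega) (by omega)
      omega
  rw [hcount, List.range_succ_eq_map, List.map_cons, List.map_map]
  congr 1
  · norm_num
  · apply List.map_congr_left
    intro k _
    simp only [Function.comp]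
    push_cast
    ring

-- concatenate f over consecutive m-sized chunks (proof-only reference recursion)
def pvCmj (f : List Int → List Int) : Nat → List Int → List Int
  | _, [] => []
  | 0, _ => []
  | (m + 1), x :: xs => f ((x :: xs).take (m + 1)) ++ pvCmj f (m + 1) ((x :: xs).drop (m + 1))
termination_by _ l => l.length
decreasing_by simp

theorem pvCmj_nil (f : List Int → List Int) (m : Nat) : pvCmj f m [] = [] := by
  rw [pvCmj.eq_def]

theorem pvCmj_cons (f : List Int → List Int) (m : Nat) (x : Int) (xs : List Int) :
    pvCmj f (m + 1) (x :: xs)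
      = f ((x :: xs).take (m + 1)) ++ pvCmj f (m + 1) ((x :: xs).drop (m + 1)) := by
  rw [pvCmj.eq_def]

-- consecutive m-sized pieces as a recursion (proof-only)
def pvPieces : Nat → List Int → List (List Int)
  | _, [] => []
  | 0, _ => []
  | (m + 1), x :: xs => (x :: xs).take (m + 1) :: pvPieces (m + 1) ((x :: xs).drop (m + 1))
termination_by _ l => l.length
decreasing_by simp

theorem pvPieces_nil (m : Nat) : pvPieces m [] = [] := by
  rw [pvPieces.eq_def]

theorem pvPieces_cons (m : Nat) (x : Int) (xs : List Int) :
    pvPieces (m + 1) (x :: xs)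
      = (x :: xs).take (m + 1) :: pvPieces (m + 1) ((x :: xs).drop (m + 1)) := by
  rw [pvPieces.eq_def]

-- the chunked foldl of port A equals pvCmj, at any aligned offset
theorem pvFold_eq_cmj (f : List Int → List Int) (m : Nat) (hm : 0 < m) (big : List Int) :
    ∀ (k j : Nat) (acc : List Int), big.length - j * m ≤ k →
      (PySem.List.pyRange ((j * m : Nat) : Int) (big.length : Int) (m : Int)).foldl
        (fun a i => a ++ f (PySem.List.slice big (some i) (some (i + (m : Int))))) acc
      = acc ++ pvCmj f m (big.drop (j * m)) := by
  intro k
  induction k with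
  | zero =>
    intro j acc h
    have hge : big.length ≤ j * m := by omega
    rw [pvRange_pos_nil _ _ _ (by exact_mod_cast hm) (by exact_mod_cast hge)]
    rw [List.drop_eq_nil_of_le hge, pvCmj_nil]
    simp
  | succ k ih =>
    intro j acc h
    by_cases hlt : j * m < big.length
    · rw [pvRange_pos_cons _ _ _ (by exact_mod_cast hm) (by exact_mod_cast hlt)]
      rw [List.foldl_cons]
      have hstep : ((j * m : Nat) : Int) + (m : Int) = (((j + 1) * m : Nat) : Int) := by
        push_cast; ring
      rw [hstep]
      rw [ih (j + 1) _ (by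
        have : (j + 1) * m = j * m + m := by ring
        omega)]
      rw [List.append_assoc]
      congr 1
      have hslice : PySem.List.slice big (some ((j * m : Nat) : Int)) (some (((j + 1) * m : Nat) : Int))
          = (big.drop (j * m)).take m := by
        have h1 : (((j + 1) * m : Nat) : Int) = ((j * m : Nat) : Int) + ((m : Nat) : Int) := by
          push_cast; ring
        rw [h1, PySem.List.slice_natCast_add]
      have hdrop : big.drop ((j + 1) * m) = (big.drop (j * m)).drop m := by
        rw [List.drop_drop]; congr 1; ring
      cases m with
      | zero => omega
      | succ m' =>
        obtain ⟨x, xs, hx⟩ : ∃ x xs, big.drop (j * (m' + 1)) = x :: xs := by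
          cases hbd : big.drop (j * (m' + 1)) with
          | nil =>
            exfalso
            have := List.length_drop (l := big) (i := j * (m' + 1))
            rw [hbd] at this
            simp at this
            omega
          | cons x xs => exact ⟨x, xs, rfl⟩
        rw [hslice, hdrop, hx, pvCmj_cons]
    · rw [pvRange_pos_nil _ _ _ (by exact_mod_cast hm) (by exact_mod_cast (by omega : big.length ≤ j * m))]
      rw [List.drop_eq_nil_of_le (by omega), pvCmj_nil]
      simp

-- the mapped pyRange of port B equals pvPieces, at any aligned offset
theorem pvMap_eq_pieces (m : Nat) (hm : 0 < m) (big : List Int) :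
    ∀ (k j : Nat), big.length - j * m ≤ k →
      (PySem.List.pyRange ((j * m : Nat) : Int) (big.length : Int) (m : Int)).map
        (fun i => PySem.List.slice big (some i) (some (i + (m : Int))))
      = pvPieces m (big.drop (j * m)) := by
  intro k
  induction k with
  | zero =>
    intro j h
    have hge : big.length ≤ j * m := by omega
    rw [pvRange_pos_nil _ _ _ (by exact_mod_cast hm) (by exact_mod_cast hge)]
    rw [List.drop_eq_nil_of_le hge, pvPieces_nil]
    simp
  | succ k ih =>
    intro j h
    by_cases hlt : j * m < big.length
    · rw [pvRange_pos_cons _ _ _ (by exact_mod_cast hm) (by exact_mod_cast hlt)]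
      rw [List.map_cons]
      have hstep : ((j * m : Nat) : Int) + (m : Int) = (((j + 1) * m : Nat) : Int) := by
        push_cast; ring
      rw [hstep]
      rw [ih (j + 1) (by
        have : (j + 1) * m = j * m + m := by ring
        omega)]
      have hslice : PySem.List.slice big (some ((j * m : Nat) : Int)) (some (((j + 1) * m : Nat) : Int))
          = (big.drop (j * m)).take m := by
        have h1 : (((j + 1) * m : Nat) : Int) = ((j * m : Nat) : Int) + ((m : Nat) : Int) := by
          push_cast; ring
        rw [h1, PySem.List.slice_natCast_add]
      have hdrop : big.drop ((j + 1) * m) = (big.drop (j * m)).drop m := by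
        rw [List.drop_drop]; congr 1; ring
      cases m with
      | zero => omega
      | succ m' =>
        obtain ⟨x, xs, hx⟩ : ∃ x xs, big.drop (j * (m' + 1)) = x :: xs := by
          cases hbd : big.drop (j * (m' + 1)) with
          | nil =>
            exfalso
            have := List.length_drop (l := big) (i := j * (m' + 1))
            rw [hbd] at this
            simp at this
            omega
          | cons x xs => exact ⟨x, xs, rfl⟩
        rw [hslice, hdrop, hx, pvPieces_cons]
    · rw [pvRange_pos_nil _ _ _ (by exact_mod_cast hm) (by exact_mod_cast (by omega : big.length ≤ j * m))]
      rw [List.drop_eq_nil_of_le (by omega), pvPieces_nil]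
      simp

-- pvCmj only ever applies f to chunks of length ≤ m
theorem pvCmj_congr (f g : List Int → List Int) (m : Nat)
    (hfg : ∀ c : List Int, c.length ≤ m → f c = g c) :
    ∀ lst : List Int, pvCmj f m lst = pvCmj g m lst := by
  intro lst
  induction hk : lst.length using Nat.strong_induction_on generalizing lst with
  | _ k ih =>
    cases m with
    | zero => cases lst <;> simp [pvCmj.eq_def]
    | succ m' =>
      cases lst with
      | nil => rw [pvCmj_nil, pvCmj_nil]
      | cons x xs =>
        rw [pvCmj_cons, pvCmj_cons]
        rw [hfg _ (by simp)]
        congr 1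
        exact ih (((x :: xs).drop (m' + 1)).length) (by subst hk; simp) _ rfl

-- walking pieces of size t two at a time, swapping each pair, equals pvCmj of the
-- half-swap over 2t-sized chunks
theorem pvWalk_eq_cmj (t : Nat) (ht : 0 < t) :
    ∀ lst : List Int,
      pvWalkPairs (pvPieces t lst)
        = pvCmj (fun c => c.drop t ++ c.take t) (2 * t) lst := by
  intro lst
  induction hk : lst.length using Nat.strong_induction_on generalizing lst with
  | _ k ih =>
    obtain ⟨t', rfl⟩ : ∃ t', t = t' + 1 := ⟨t - 1, by omega⟩
    obtain ⟨u, hu⟩ : ∃ u, 2 * (t' + 1) = u + 1 := ⟨2 * t' + 1, by ring⟩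
    cases lst with
    | nil => rw [pvPieces_nil, pvCmj_nil]; rfl
    | cons x xs =>
      rw [pvPieces_cons, hu, pvCmj_cons, ← hu]
      by_cases hshort : (x :: xs).length ≤ t' + 1
      · -- one piece only: the lone trailing piece is kept
        have hshort2 : (x :: xs).length ≤ 2 * (t' + 1) := by omega
        rw [List.drop_eq_nil_of_le hshort, pvPieces_nil]
        simp only [pvWalkPairs]
        rw [List.drop_eq_nil_of_le hshort2, pvCmj_nil, List.append_nil]
        rw [List.take_of_length_le hshort2]
        rw [List.drop_eq_nil_of_le hshort, List.take_of_length_le hshort]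
        simp
      · -- at least two pieces: head pair swapped, then recurse
        rw [Nat.not_le] at hshort
        have hne : (x :: xs).drop (t' + 1) ≠ [] := by
          apply List.ne_nil_of_length_pos
          rw [List.length_drop]
          omega
        obtain ⟨y, ys, hy⟩ := List.exists_cons_of_ne_nil hne
        rw [hy, pvPieces_cons, ← hy]
        simp only [pvWalkPairs]
        have hrest : ((x :: xs).drop (t' + 1)).drop (t' + 1) = (x :: xs).drop (2 * (t' + 1)) := by
          rw [List.drop_drop]; congr 1; ring
        rw [hrest]
        rw [ih ((x :: xs).drop (2 * (t' + 1))).length (by subst hk; simp; omega) _ rfl]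
        have e1 : ((x :: xs).take (2 * (t' + 1))).drop (t' + 1)
            = ((x :: xs).drop (t' + 1)).take (t' + 1) := by
          rw [List.drop_take]; congr 1; omega
        have e2 : ((x :: xs).take (2 * (t' + 1))).take (t' + 1) = (x :: xs).take (t' + 1) := by
          rw [List.take_take]; congr 1; omega
        rw [e1, e2, List.append_assoc]

-- the half-swap form of A's per-chunk branch body, on chunks of length ≤ 2t
theorem pvBranch_eq (n : Int) (hn : 0 < n) (c : List Int) (hc : (c.length : Int) ≤ 2 * n) :
    (if n ≤ (c.length : Int) ∧ (c.length : Int) < 2 * n then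
        PySem.List.slice c (some n) none ++ PySem.List.slice c none (some n)
      else if (c.length : Int) = 2 * n then
        PySem.List.slice c (some n) none ++ PySem.List.slice c none (some n)
      else c)
    = c.drop n.toNat ++ c.take n.toNat := by
  rw [PySem.List.slice_from c hn.le, PySem.List.slice_to c hn.le]
  split_ifs with h1 h2
  · rfl
  · rfl
  · have hlen : c.length < n.toNat := by omega
    rw [List.drop_eq_nil_of_le hlen.le, List.take_of_length_le hlen.le]
    simp

-- ===== VERDICT (by name: the statement is the Claim_ definition above) =====
theorem flip_list_spec : Claim_equal_flip_list := by
  intro lst n _ hpre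
  obtain ⟨hn, hle⟩ := hpre
  unfold Spec_flip_list flip_list flip_list_alt
  rw [if_neg (by omega), if_neg (by omega)]
  set t : Nat := n.toNat with htdef
  have hnt : (t : Int) = n := Int.toNat_of_nonneg hn.le
  have h2t : ((2 * t : Nat) : Int) = 2 * n := by push_cast; omega
  have ht : 0 < t := by omega
  have hfun : (fun (acc : List Int) (i : Int) =>
      let chunk := PySem.List.slice lst (some i) (some (i + 2 * n))
      if n ≤ (chunk.length : Int) ∧ (chunk.length : Int) < 2 * n then
        acc ++ (PySem.List.slice chunk (some n) none ++ PySem.List.slice chunk none (some n))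
      else if (chunk.length : Int) = 2 * n then
        acc ++ (PySem.List.slice chunk (some n) none ++ PySem.List.slice chunk none (some n))
      else
        acc ++ chunk)
      = (fun (a : List Int) (i : Int) => a ++
          (let c := PySem.List.slice lst (some i) (some (i + 2 * n))
           if n ≤ (c.length : Int) ∧ (c.length : Int) < 2 * n then
             PySem.List.slice c (some n) none ++ PySem.List.slice c none (some n)
           else if (c.length : Int) = 2 * n then
             PySem.List.slice c (some n) none ++ PySem.List.slice c none (some n)
           else c)) := by
    funext a i
    dsimp only
    split_ifs <;> rfl
  have hA := pvFold_eq_cmj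
    (fun c => if n ≤ (c.length : Int) ∧ (c.length : Int) < 2 * n then
        PySem.List.slice c (some n) none ++ PySem.List.slice c none (some n)
      else if (c.length : Int) = 2 * n then
        PySem.List.slice c (some n) none ++ PySem.List.slice c none (some n)
      else c)
    (2 * t) (by omega) lst lst.length 0 [] (by omega)
  simp only [Nat.zero_mul, Nat.cast_zero, List.drop_zero, List.nil_append] at hA
  rw [h2t] at hA
  rw [hfun, hA]
  have hB := pvMap_eq_pieces t ht lst lst.length 0 (by omega)
  simp only [Nat.zero_mul, Nat.cast_zero, List.drop_zero] at hB
  rw [hnt] at hB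
  rw [hB, pvWalk_eq_cmj t ht lst]
  apply pvCmj_congr
  intro c hc
  rw [pvBranch_eq n hn c (by omega)]
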